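-- pv_equiv track=rewrite | github.com/hyeonjun/AlgorithmTest | Algorithm_Study/Algorithm_Type/Search_Basic_1.py | solution
-- ===== SOURCE A (Python) =====
-- def solution(trophy):
--     def check(array):
--         now = array[0]
--         result = 1
--         for i in range(1, len(array)):
--             if now < array[i]:
--                 result += 1
--                 now = array[i]
--         return result
--     l = check(trophy)
--     trophy.reverse()
--     r = check(trophy)
--     return l,r
-- ===== SOURCE B (Python) =====
-- def solution(trophy):
--     def records(array):
--         return sum(1 for i, x in enumerate(array)
--                    if all(y < x for y in array[:i]))
--     l = records(trophy)
--     trophy.reverse()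
--     r = records(trophy)
--     return l, r
-- ===== Notes on version B (the rewrite author's own statement) =====
-- stated objective: alternative
-- what changed: B drops A's running-maximum/counter state entirely: it counts an index as a record by directly testing the definition (all earlier elements are strictly smaller) over each prefix, an O(n^2) quantifier formulation instead of A's O(n) single-pass scan; B keeps A's in-place trophy.reverse().
-- outside the precondition, e.g. on solution([]): A raises IndexError, B returns (0, 0)
import Mathlib
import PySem

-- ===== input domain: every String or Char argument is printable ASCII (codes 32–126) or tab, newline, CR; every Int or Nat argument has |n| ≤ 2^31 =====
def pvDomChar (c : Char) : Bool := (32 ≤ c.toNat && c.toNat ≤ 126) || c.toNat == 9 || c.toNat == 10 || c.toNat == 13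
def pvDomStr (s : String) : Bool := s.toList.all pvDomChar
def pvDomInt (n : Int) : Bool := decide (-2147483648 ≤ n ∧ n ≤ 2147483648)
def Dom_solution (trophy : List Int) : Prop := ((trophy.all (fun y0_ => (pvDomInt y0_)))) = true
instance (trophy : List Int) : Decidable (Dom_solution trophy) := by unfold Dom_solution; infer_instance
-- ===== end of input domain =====

-- B replaces A's running-maximum counter scan by the direct definition of a record:
-- index i counts iff all earlier elements are strictly smaller (objective: alternative, O(n^2));
-- B performs the same in-place trophy.reverse(); the equivalence proved is about the return value.

-- ===== PORT A =====
-- check(array): now = array[0]; result = 1; walk indices 1..len-1 counting new records.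
def pvCheckA (array : List Int) : Int :=
  match PySem.List.pyGet? array 0 with
  | none => 0   -- unreachable under Pre_ (array[0] raises IndexError on [])
  | some a0 =>
    ((PySem.List.pyRange 1 (array.length : Int) 1).foldl
      (fun (st : Int × Int) i =>
        let x := PySem.List.pyGetD array i 0
        if st.1 < x then (x, st.2 + 1) else st)
      (a0, 1)).2

def solution (trophy : List Int) : Int × Int :=
  let l := pvCheckA trophy
  let t := trophy.reverse
  let r := pvCheckA t
  (l, r)

-- ===== PORT B =====
-- records(array): sum 1 over enumerate(array) whenever all y in array[:i] satisfy y < x.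
def pvRecordsB (array : List Int) : Int :=
  (PySem.List.enumerate array 0).foldl
    (fun (acc : Int) p =>
      if (PySem.List.slice array none (some p.1)).all (fun y => y < p.2) then acc + 1 else acc)
    0

def solution_alt (trophy : List Int) : Int × Int :=
  let l := pvRecordsB trophy
  let t := trophy.reverse
  let r := pvRecordsB t
  (l, r)

-- ===== PRECONDITION & SPEC =====
-- Pre_ excludes only the empty list, on which Python A raises IndexError (array[0]).
def Pre_solution (trophy : List Int) : Prop := trophy ≠ []
instance (trophy : List Int) : Decidable (Pre_solution trophy) := by unfold Pre_solution; infer_instance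
def pvWitness_solution : List Int := ([1, 3, 2, 5])

def Spec_solution (trophy : List Int) (out : Int × Int) : Prop := out = solution_alt trophy
instance (trophy : List Int) (out : Int × Int) : Decidable (Spec_solution trophy out) := by unfold Spec_solution; infer_instance

-- ===== CLAIM (what is proved, stated in full; the proofs are below) =====
def Claim_equal_solution : Prop := ∀ (trophy : List Int), Dom_solution trophy → Pre_solution trophy → Spec_solution trophy (solution trophy)

-- ===== LEMMAS AND PROOFS =====

-- number of strict records seen after current max m (what A's loop adds to result)
def pvInc : Int → List Int → Nat
  | _, [] => 0
  | m, x :: xs => if m < x then 1 + pvInc x xs else pvInc m xs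

-- B's quantifier count relative to an explicit prefix
def pvCnt : List Int → List Int → Int
  | _, [] => 0
  | pre, x :: xs => (if pre.all (fun y => y < x) then 1 else 0) + pvCnt (pre ++ [x]) xs

theorem pvFoldA_snd (rest : List Int) : ∀ (m c : Int),
    (rest.foldl (fun (st : Int × Int) x =>
        if st.1 < x then (x, st.2 + 1) else st) (m, c)).2 = c + (pvInc m rest : Int) := by
  induction rest with
  | nil => simp [pvInc]
  | cons x xs ih =>
    intro m c
    simp only [List.foldl_cons, pvInc]
    by_cases h : m < x
    · simp only [if_pos h, ih]; push_cast; ring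
    · simp only [if_neg h, ih]

theorem pvFoldB (array : List Int) : ∀ (xs pre : List Int) (acc : Int),
    array = pre ++ xs →
    ((PySem.List.enumerate xs (pre.length : Int)).foldl
      (fun (acc : Int) p =>
        if (PySem.List.slice array none (some p.1)).all (fun y => y < p.2) then acc + 1 else acc)
      acc) = acc + pvCnt pre xs := by
  intro xs
  induction xs with
  | nil => intro pre acc _; simp [PySem.List.enumerate, pvCnt]
  | cons x rest ih =>
    intro pre acc harr
    rw [PySem.List.enumerate_cons]
    simp only [List.foldl_cons]
    have hsl : PySem.List.slice array none (some (pre.length : Int)) = pre := by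
      rw [PySem.List.slice_to_natCast, harr, List.take_left]
    have hlen : ((pre.length : Int) + 1) = (((pre ++ [x]).length : Nat) : Int) := by
      simp
    rw [hsl, hlen, ih (pre ++ [x]) _ (by simp [harr])]
    simp only [pvCnt]
    by_cases h : pre.all (fun y => y < x)
    · simp [h]; ring
    · simp [h]

theorem pvCnt_eq_pvInc (xs : List Int) : ∀ (pre : List Int) (m : Int),
    m ∈ pre → (∀ y ∈ pre, y ≤ m) → pvCnt pre xs = (pvInc m xs : Int) := by
  induction xs with
  | nil => intro pre m _ _; simp [pvCnt, pvInc]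
  | cons x rest ih =>
    intro pre m hm hub
    by_cases h : m < x
    · have hall : pre.all (fun y => y < x) = true := by
        simp only [List.all_eq_true, decide_eq_true_eq]
        intro y hy; exact lt_of_le_of_lt (hub y hy) h
      simp only [pvCnt, pvInc, if_pos h, hall, if_pos]
      rw [ih (pre ++ [x]) x (by simp)
        (by intro y hy; rcases List.mem_append.1 hy with h' | h'
            · exact le_of_lt (lt_of_le_of_lt (hub y h') h)
            · simp at h'; omega)]
      push_cast; ring
    · have hall : pre.all (fun y => y < x) = false := by
        simp only [List.all_eq_false]
        exact ⟨m, hm, by simpa using h⟩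
      simp only [pvCnt, pvInc, if_neg h, hall]
      rw [ih (pre ++ [x]) m (by simp [hm])
        (by intro y hy; rcases List.mem_append.1 hy with h' | h'
            · exact hub y h'
            · simp at h'; omega)]
      simp

theorem pvCheck_eq_records (array : List Int) (hne : array ≠ []) :
    pvCheckA array = pvRecordsB array := by
  cases array with
  | nil => exact absurd rfl hne
  | cons a0 rest =>
    have hget : PySem.List.pyGet? (a0 :: rest) 0 = some a0 := by
      simp [PySem.List.pyGet?, PySem.List.pyIdx?]
    simp only [pvCheckA, hget]
    rw [PySem.List.foldl_pyRange_pyGetD' (xs := a0 :: rest) (d := 0)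
      (f := fun (st : Int × Int) x => if st.1 < x then (x, st.2 + 1) else st)
      (init := (a0, 1)) (a := 1) (by omega)]
    simp only [Int.toNat_one, List.drop_one, List.tail_cons]
    rw [pvFoldA_snd]
    -- B side: first enumerate step has index 0, empty slice, so 'all' holds and acc becomes 1
    unfold pvRecordsB
    rw [PySem.List.enumerate_cons]
    simp only [List.foldl_cons]
    have hsl0 : PySem.List.slice (a0 :: rest) none (some (0 : Int)) = [] := by
      have h := PySem.List.slice_to_natCast (xs := (a0 :: rest)) (b := 0)
      simpa using h
    rw [hsl0]
    simp only [List.all_nil, if_pos]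
    have h1 : (0 : Int) + 1 = (([a0] : List Int).length : Int) := by simp
    rw [h1, pvFoldB (a0 :: rest) rest [a0] (([a0].length : Int)) (by simp),
        pvCnt_eq_pvInc rest [a0] a0 (by simp) (by simp)]
    simp

-- ===== VERDICT (by name: the statement is the Claim_ definition above) =====
theorem solution_spec : Claim_equal_solution := by
  intro trophy _ hpre
  unfold Spec_solution solution solution_alt
  simp only [pvCheck_eq_records trophy hpre,
      pvCheck_eq_records trophy.reverse (by simpa using hpre)]
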